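-- pv_equiv track=rewrite | github.com/YJY1220/202202_Python-joonion | ready_middle_exam/Lab01(ch02)/1-날짜계산.py | solution
-- ===== SOURCE A (Python) =====
-- def solution(x,y):
--     res = 0
--     cnt = 1
--     cnt_pre = 0
--     res = 0
--     for i in range(x,y+1):
--         if (i % 4 == 0 and i % 100 != 0) or i % 400 == 0:
--             for i in range(366):
--                 cnt_pre = cnt
--                 cnt = cnt_pre + 1
--                 res += cnt
--         else:
--             for i in range(365):
--                 cnt_pre = cnt
--                 cnt = cnt_pre + 1
--                 res += cnt
--     return res #전체 for문에 대한 결과값을 리턴해야하므로 return 값은 여기다 적어줘야함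
-- ===== SOURCE B (Python) =====
-- def solution(x, y):
--     if y < x:
--         return 0
--     def leaps(n):
--         return n // 4 - n // 100 + n // 400
--     n = 365 * (y - x + 1) + leaps(y) - leaps(x - 1)
--     return (n + 1) * (n + 2) // 2 - 1
-- ===== Notes on version B (the rewrite author's own statement) =====
-- stated objective: faster
-- what changed: Replaces the day-by-day double loop with a closed form: leap years counted arithmetically via n//4-n//100+n//400 differences, total days N, and the triangular-number formula (N+1)(N+2)//2-1.
import Mathlib
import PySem

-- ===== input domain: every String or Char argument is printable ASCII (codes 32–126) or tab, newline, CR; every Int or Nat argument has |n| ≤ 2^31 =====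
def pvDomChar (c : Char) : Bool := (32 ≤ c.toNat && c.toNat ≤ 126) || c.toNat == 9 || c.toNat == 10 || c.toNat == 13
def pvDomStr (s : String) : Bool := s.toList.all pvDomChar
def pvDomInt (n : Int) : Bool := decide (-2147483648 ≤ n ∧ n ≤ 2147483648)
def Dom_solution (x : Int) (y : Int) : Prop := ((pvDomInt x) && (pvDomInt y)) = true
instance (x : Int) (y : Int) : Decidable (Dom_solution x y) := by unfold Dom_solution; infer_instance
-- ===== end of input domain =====

-- B replaces A's day-by-day double loop with an O(1) closed form: arithmetic leap count + triangular sum.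


-- ===== PORT A =====
-- state = (res, cnt, cnt_pre), exactly A's three loop variables
def dayStep (s : Int × Int × Int) (_ : Int) : Int × Int × Int :=
  let cnt_pre := s.2.1
  let cnt := cnt_pre + 1
  (s.1 + cnt, cnt, cnt_pre)

def yearBody (s : Int × Int × Int) (i : Int) : Int × Int × Int :=
  if (PySem.Int.mod i 4 == 0 && PySem.Int.mod i 100 != 0) || PySem.Int.mod i 400 == 0 then
    (PySem.List.pyRange 0 366 1).foldl dayStep s
  else
    (PySem.List.pyRange 0 365 1).foldl dayStep s

def solution (x : Int) (y : Int) : Int :=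
  ((PySem.List.pyRange x (y + 1) 1).foldl yearBody (0, 1, 0)).1

-- ===== PORT B =====
def leaps_alt (n : Int) : Int :=
  PySem.Int.floordiv n 4 - PySem.Int.floordiv n 100 + PySem.Int.floordiv n 400

def solution_alt (x : Int) (y : Int) : Int :=
  if y < x then 0
  else
    let n := 365 * (y - x + 1) + leaps_alt y - leaps_alt (x - 1)
    PySem.Int.floordiv ((n + 1) * (n + 2)) 2 - 1

-- ===== PRECONDITION & SPEC =====
def Spec_solution (x : Int) (y : Int) (out : Int) : Prop := out = solution_alt x y
instance (x : Int) (y : Int) (out : Int) : Decidable (Spec_solution x y out) := by unfold Spec_solution; infer_instance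

-- ===== CLAIM (what is proved, stated in full; the proofs are below) =====
def Claim_equal_solution : Prop := ∀ (x : Int) (y : Int), Dom_solution x y → Spec_solution x y (solution x y)

-- ===== LEMMAS AND PROOFS =====

-- triangular numbers, used only by the proofs
def triN : Nat → Nat
  | 0 => 0
  | k + 1 => triN k + (k + 1)

theorem two_triN (k : Nat) : 2 * (triN k : Int) = (k : Int) * ((k : Int) + 1) := by
  induction k with
  | zero => simp [triN]
  | succ k ih => simp only [triN]; push_cast; push_cast at ih; linarith

-- the inner day loop: k ≥ 1 iterations starting from (r, c, p)
theorem dayLoop (k : Nat) (r c p : Int) :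
    (PySem.List.pyRange 0 ((k : Int) + 1) 1).foldl dayStep (r, c, p)
      = (r + ((k : Int) + 1) * c + (triN (k + 1) : Int), c + (k : Int) + 1, c + (k : Int)) := by
  induction k generalizing r c p with
  | zero =>
      rw [show ((0 : Nat) : Int) + 1 = 0 + 1 by norm_num,
        PySem.List.pyRange_one_succ_right (le_refl 0), PySem.List.pyRange_one_eq_nil (le_refl 0)]
      simp [dayStep, triN]; ring
  | succ k ih =>
      rw [show ((k + 1 : Nat) : Int) + 1 = ((k : Int) + 1) + 1 by push_cast; ring,
        PySem.List.pyRange_one_succ_right (by positivity), List.foldl_append, ih]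
      simp only [List.foldl, dayStep, triN]
      refine Prod.ext ?_ (Prod.ext ?_ ?_) <;> simp <;> push_cast <;> ring

-- one year's worth of leap-count difference
theorem leaps_step (i : Int) :
    leaps_alt i = leaps_alt (i - 1) +
      (if (PySem.Int.mod i 4 == 0 && PySem.Int.mod i 100 != 0) || PySem.Int.mod i 400 == 0
       then 1 else 0) := by
  simp only [leaps_alt,
    PySem.Int.floordiv_eq_ediv_of_pos (a := i) (b := 4) (by norm_num),
    PySem.Int.floordiv_eq_ediv_of_pos (a := i) (b := 100) (by norm_num),
    PySem.Int.floordiv_eq_ediv_of_pos (a := i) (b := 400) (by norm_num),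
    PySem.Int.floordiv_eq_ediv_of_pos (a := i - 1) (b := 4) (by norm_num),
    PySem.Int.floordiv_eq_ediv_of_pos (a := i - 1) (b := 100) (by norm_num),
    PySem.Int.floordiv_eq_ediv_of_pos (a := i - 1) (b := 400) (by norm_num),
    PySem.Int.mod_eq_emod_of_pos (a := i) (b := 4) (by norm_num),
    PySem.Int.mod_eq_emod_of_pos (a := i) (b := 100) (by norm_num),
    PySem.Int.mod_eq_emod_of_pos (a := i) (b := 400) (by norm_num)]
  split_ifs with h
  · simp only [Bool.or_eq_true, Bool.and_eq_true, beq_iff_eq, bne_iff_ne, ne_eq] at h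
    omega
  · simp only [Bool.or_eq_true, Bool.and_eq_true, beq_iff_eq, bne_iff_ne, ne_eq] at h
    omega

-- total day count of years x .. x+n-1, in closed form
def daysD (n : Nat) (x : Int) : Int := 365 * n + leaps_alt (x + n - 1) - leaps_alt (x - 1)

-- the outer year loop: invariant over n years starting at x
theorem yearLoop (n : Nat) (x : Int) : ∃ R : Int,
    (PySem.List.pyRange x (x + (n : Int)) 1).foldl yearBody (0, 1, 0)
      = (R, daysD n x + 1, daysD n x) ∧ 2 * R = daysD n x * (daysD n x + 3) := by
  induction n with
  | zero =>
      refine ⟨0, ?_, by simp [daysD]⟩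
      rw [show x + ((0 : Nat) : Int) = x by norm_num, PySem.List.pyRange_one_eq_nil (le_refl x)]
      simp [daysD]
  | succ n ih =>
      obtain ⟨R, hfold, hR⟩ := ih
      rw [show x + ((n + 1 : Nat) : Int) = (x + (n : Int)) + 1 by push_cast; ring,
        PySem.List.pyRange_one_succ_right (by omega), List.foldl_append, hfold]
      simp only [List.foldl]
      have hstep := leaps_step (x + (n : Int))
      unfold yearBody
      split_ifs with h
      · have hDsucc : daysD (n + 1) x = daysD n x + 366 := by
          simp only [daysD]
          rw [if_pos h] at hstep
          push_cast
          rw [show x + ((n : Int) + 1) - 1 = x + (n : Int) by ring, hstep]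
          ring
        rw [show (366 : Int) = ((365 : Nat) : Int) + 1 by norm_num, dayLoop]
        refine ⟨R + (((365 : Nat) : Int) + 1) * (daysD n x + 1) + (triN (365 + 1) : Int), ?_, ?_⟩
        · refine Prod.ext rfl (Prod.ext ?_ ?_) <;> simp <;> push_cast <;> omega
        · have ht := two_triN 366
          push_cast at ht
          rw [hDsucc]
          push_cast
          linear_combination hR + ht
      · have hDsucc : daysD (n + 1) x = daysD n x + 365 := by
          simp only [daysD]
          rw [if_neg h] at hstep
          push_cast
          rw [show x + ((n : Int) + 1) - 1 = x + (n : Int) by ring, hstep]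
          ring
        rw [show (365 : Int) = ((364 : Nat) : Int) + 1 by norm_num, dayLoop]
        refine ⟨R + (((364 : Nat) : Int) + 1) * (daysD n x + 1) + (triN (364 + 1) : Int), ?_, ?_⟩
        · refine Prod.ext rfl (Prod.ext ?_ ?_) <;> simp <;> push_cast <;> omega
        · have ht := two_triN 365
          push_cast at ht
          rw [hDsucc]
          push_cast
          linear_combination hR + ht

-- ===== VERDICT (by name: the statement is the Claim_ definition above) =====
theorem solution_spec : Claim_equal_solution := by
  intro x y _
  unfold Spec_solution solution solution_alt
  by_cases hxy : y < x
  · rw [PySem.List.pyRange_one_eq_nil (by omega), if_pos hxy]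
    simp
  · rw [if_neg hxy]
    set n : Nat := (y + 1 - x).toNat with hn
    have hxn : x + (n : Int) = y + 1 := by omega
    obtain ⟨R, hfold, hR⟩ := yearLoop n x
    rw [← hxn, hfold]
    have hD : daysD n x = 365 * (y - x + 1) + leaps_alt y - leaps_alt (x - 1) := by
      simp only [daysD]
      rw [show x + (n : Int) - 1 = y by omega, show (n : Int) = y - x + 1 by omega]
    show R = PySem.Int.floordiv
        ((365 * (y - x + 1) + leaps_alt y - leaps_alt (x - 1) + 1) *
         (365 * (y - x + 1) + leaps_alt y - leaps_alt (x - 1) + 2)) 2 - 1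
    rw [← hD, PySem.Int.floordiv_eq_ediv_of_pos (by norm_num)]
    have h2 : (daysD n x + 1) * (daysD n x + 2) = 2 * R + 2 := by linear_combination -hR
    rw [h2]
    omega
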